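-- pv_equiv track=rewrite | github.com/CyberBridgeEU/cyberbridge | cti/service/app/services/scanner_results_service.py | _parse_nmap_labels
-- ===== SOURCE A (Python) =====
-- def _parse_nmap_labels(labels: list[str]) -> tuple[str, str, str]:
--     port = ""
--     service = ""
--     protocol = ""
--     for lbl in labels:
--         if lbl.startswith("nmap-port-"):
--             port = lbl.replace("nmap-port-", "")
--         elif lbl.startswith("nmap-service-"):
--             service = lbl.replace("nmap-service-", "")
--         elif lbl.startswith("nmap-protocol-"):
--             protocol = lbl.replace("nmap-protocol-", "")
--     return port, service, protocol
-- ===== SOURCE B (Python) =====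
-- def _parse_nmap_labels(labels: list[str]) -> tuple[str, str, str]:
--     def last(prefix):
--         return next((l.replace(prefix, "") for l in reversed(labels) if l.startswith(prefix)), "")
--     return last("nmap-port-"), last("nmap-service-"), last("nmap-protocol-")
-- ===== Notes on version B (the rewrite author's own statement) =====
-- stated objective: alternative
-- what changed: Replaces the single forward loop with mutable state and an if/elif dispatch by three independent per-prefix scans, each taking the last matching label via next() over reversed(labels).
import Mathlib
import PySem

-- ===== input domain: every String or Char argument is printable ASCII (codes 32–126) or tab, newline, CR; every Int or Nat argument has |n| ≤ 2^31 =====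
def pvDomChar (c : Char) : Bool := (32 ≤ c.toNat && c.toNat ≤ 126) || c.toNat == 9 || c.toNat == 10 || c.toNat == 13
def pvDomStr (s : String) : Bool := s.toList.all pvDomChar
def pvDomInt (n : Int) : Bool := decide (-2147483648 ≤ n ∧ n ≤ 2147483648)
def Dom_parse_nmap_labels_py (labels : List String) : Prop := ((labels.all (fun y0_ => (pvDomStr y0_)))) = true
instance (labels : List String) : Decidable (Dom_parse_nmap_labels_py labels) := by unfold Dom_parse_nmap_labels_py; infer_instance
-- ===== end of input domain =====

-- B replaces A's single stateful if/elif loop by three independent per-prefix scans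
-- (last matching label, found over the reversed list); objective: alternative decomposition.

-- ===== PORT A =====
def parse_nmap_labels_py (labels : List String) : String × String × String :=
  labels.foldl (fun st lbl =>
    if PySem.Str.startswith lbl "nmap-port-" then
      (PySem.Str.replace lbl "nmap-port-" "", st.2.1, st.2.2)
    else if PySem.Str.startswith lbl "nmap-service-" then
      (st.1, PySem.Str.replace lbl "nmap-service-" "", st.2.2)
    else if PySem.Str.startswith lbl "nmap-protocol-" then
      (st.1, st.2.1, PySem.Str.replace lbl "nmap-protocol-" "")
    else st) ("", "", "")

-- ===== PORT B =====
-- next((l.replace(pre, "") for l in reversed(labels) if l.startswith(pre)), "")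
def pvLastMatch (labels : List String) (pre : String) : String :=
  ((labels.reverse.find? (fun l => PySem.Str.startswith l pre)).map
    (fun l => PySem.Str.replace l pre "")).getD ""

def parse_nmap_labels_py_alt (labels : List String) : String × String × String :=
  (pvLastMatch labels "nmap-port-", pvLastMatch labels "nmap-service-",
   pvLastMatch labels "nmap-protocol-")

-- ===== PRECONDITION & SPEC =====
def Spec_parse_nmap_labels_py (labels : List String) (out : String × String × String) : Prop := out = parse_nmap_labels_py_alt labels
instance (labels : List String) (out : String × String × String) : Decidable (Spec_parse_nmap_labels_py labels out) := by unfold Spec_parse_nmap_labels_py; infer_instance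

-- ===== CLAIM (what is proved, stated in full; the proofs are below) =====
def Claim_equal_parse_nmap_labels_py : Prop := ∀ (labels : List String), Dom_parse_nmap_labels_py labels → Spec_parse_nmap_labels_py labels (parse_nmap_labels_py labels)

-- ===== LEMMAS AND PROOFS =====

-- last match over `labels` with default `d` (generalisation of pvLastMatch for the induction)
def pvPick (pre : String) (labels : List String) (d : String) : String :=
  ((labels.reverse.find? (fun l => PySem.Str.startswith l pre)).map
    (fun l => PySem.Str.replace l pre "")).getD d

lemma pvPick_nil (pre d : String) : pvPick pre [] d = d := rfl

lemma pvPick_cons (pre l d : String) (ls : List String) :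
    pvPick pre (l :: ls) d
      = pvPick pre ls (if PySem.Str.startswith l pre then PySem.Str.replace l pre "" else d) := by
  simp only [pvPick, List.reverse_cons, List.find?_append]
  cases h : ls.reverse.find? (fun x => PySem.Str.startswith x pre) with
  | some x => simp
  | none => simp [List.find?]; split_ifs <;> simp_all

-- mutually exclusive prefixes: no string starts with two of the three nmap prefixes
lemma pv_not_both {p q : String} (s : String)
    (hpq : ¬ p.toList <+: q.toList) (hqp : ¬ q.toList <+: p.toList)
    (h : PySem.Str.startswith s p = true) : PySem.Str.startswith s q = false := by
  by_contra hq
  rw [Bool.not_eq_false] at hq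
  rw [PySem.Str.startswith_eq, PySem.Chars.startswith_iff] at h hq
  rcases List.prefix_or_prefix_of_prefix h hq with h' | h'
  · exact hpq h'
  · exact hqp h'

lemma pv_main (ls : List String) : ∀ (a b c : String),
    ls.foldl (fun st lbl =>
      if PySem.Str.startswith lbl "nmap-port-" then
        (PySem.Str.replace lbl "nmap-port-" "", st.2.1, st.2.2)
      else if PySem.Str.startswith lbl "nmap-service-" then
        (st.1, PySem.Str.replace lbl "nmap-service-" "", st.2.2)
      else if PySem.Str.startswith lbl "nmap-protocol-" then
        (st.1, st.2.1, PySem.Str.replace lbl "nmap-protocol-" "")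
      else st) (a, b, c)
    = (pvPick "nmap-port-" ls a, pvPick "nmap-service-" ls b, pvPick "nmap-protocol-" ls c) := by
  induction ls with
  | nil => intro a b c; simp [pvPick_nil]
  | cons l ls ih =>
    intro a b c
    simp only [List.foldl_cons, pvPick_cons]
    by_cases hp : PySem.Str.startswith l "nmap-port-" = true
    · have hs := pv_not_both l (p := "nmap-port-") (q := "nmap-service-") (by decide) (by decide) hp
      have ht := pv_not_both l (p := "nmap-port-") (q := "nmap-protocol-") (by decide) (by decide) hp
      simp only [hp, hs, ht, Bool.false_eq_true, if_true, if_false]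
      exact ih _ _ _
    · rw [Bool.not_eq_true] at hp
      by_cases hs : PySem.Str.startswith l "nmap-service-" = true
      · have ht := pv_not_both l (p := "nmap-service-") (q := "nmap-protocol-") (by decide) (by decide) hs
        simp only [hp, hs, ht, Bool.false_eq_true, if_true, if_false]
        exact ih _ _ _
      · rw [Bool.not_eq_true] at hs
        by_cases ht : PySem.Str.startswith l "nmap-protocol-" = true
        · simp only [hp, hs, ht, Bool.false_eq_true, if_true, if_false]
          exact ih _ _ _
        · rw [Bool.not_eq_true] at ht
          simp only [hp, hs, ht, Bool.false_eq_true, if_false]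
          exact ih _ _ _

-- ===== VERDICT (by name: the statement is the Claim_ definition above) =====
theorem parse_nmap_labels_py_spec : Claim_equal_parse_nmap_labels_py := by
  intro labels _
  unfold Spec_parse_nmap_labels_py parse_nmap_labels_py parse_nmap_labels_py_alt
  rw [pv_main]
  rfl
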